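-- pv_equiv track=rewrite | github.com/tacianem/Python | Solved Challenges/PasswordDecryption.py | encryptPassword
-- ===== SOURCE A (Python) =====
-- def encryptPassword(pwd):
--     s = ""
--     ignored_chars = []
--
--     for i, char in enumerate(pwd):
--         if char.isnumeric():
--             s = char + s + '0'
--         elif char.islower():
--             if not i == len(pwd)-1: # namely, if there's next char
--                 next_char = pwd[i+1]
--                 if next_char.isupper():
--                     s += next_char + char + '*'
--                     ignored_chars.append((i+1, next_char))
--                 else:
--                     s += char
--             else: # if last char is lower case
--                 s += char
--         elif (char.isupper() and not (i, char) in ignored_chars):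
--             s += char
--
--     return s
-- ===== SOURCE B (Python) =====
-- def encryptPassword(pwd):
--     # Index-driven pass: digits prepend, a lowercase char consumes a following
--     # uppercase as a pair (i += 2), so no skip-list is ever needed.
--     s = ""
--     i = 0
--     n = len(pwd)
--     while i < n:
--         c = pwd[i]
--         if c.isdigit():
--             s = c + s + '0'
--             i += 1
--         elif c.islower():
--             if i + 1 < n and pwd[i+1].isupper():
--                 s += pwd[i+1] + c + '*'
--                 i += 2
--             else:
--                 s += c
--                 i += 1
--         else:
--             if c.isupper():
--                 s += c
--             i += 1
--     return s
-- ===== Notes on version B (the rewrite author's own statement) =====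
-- stated objective: alternative
-- what changed: Replaces enumerate plus an ignored_chars skip-list (tuple membership test per uppercase char) by an explicit index walk that consumes a lowercase+uppercase pair in one step (i += 2), so no skip-list or membership test exists.
import Mathlib
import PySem

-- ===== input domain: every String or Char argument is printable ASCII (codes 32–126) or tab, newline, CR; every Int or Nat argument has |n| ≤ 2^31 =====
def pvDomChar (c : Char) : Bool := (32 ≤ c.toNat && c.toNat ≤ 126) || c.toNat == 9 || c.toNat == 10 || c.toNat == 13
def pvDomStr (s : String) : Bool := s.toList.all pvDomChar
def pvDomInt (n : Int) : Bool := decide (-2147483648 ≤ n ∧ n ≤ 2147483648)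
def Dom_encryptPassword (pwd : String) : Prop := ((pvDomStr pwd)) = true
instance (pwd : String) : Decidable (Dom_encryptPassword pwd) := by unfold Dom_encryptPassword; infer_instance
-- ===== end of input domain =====

-- B replaces A's enumerate + ignored-chars skip-list by pair-consumption with a
-- variable index step (alternative decomposition, same cost).


-- ===== PORT A =====
-- the for-loop over enumerate(pwd), carrying s and ignored_chars.
-- Python's char.isnumeric() coincides with isdigit on the ASCII domain.
-- pwd[i+1] is only evaluated when i ≠ len-1, so the '.getD' default is never used.
def aLoop (cs : List Char) : List (Int × Char) → String → List (Int × Char) → String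
  | [], s, _ => s
  | (i, c) :: rest, s, ign =>
    if PySem.Chars.isdigit c then
      aLoop cs rest (String.mk [c] ++ s ++ "0") ign
    else if PySem.Chars.islower c then
      if i ≠ (cs.length : Int) - 1 then
        let nc := (PySem.List.pyGet? cs (i + 1)).getD ' '
        if PySem.Chars.isupper nc then
          aLoop cs rest (s ++ String.mk [nc, c, '*']) (ign ++ [(i + 1, nc)])
        else aLoop cs rest (s.push c) ign
      else aLoop cs rest (s.push c) ign
    else
      if PySem.Chars.isupper c && !(ign.contains (i, c)) then
        aLoop cs rest (s.push c) ign
      else aLoop cs rest s ign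

def encryptPassword (pwd : String) : String :=
  aLoop pwd.toList (PySem.List.enumerate pwd.toList 0) "" []

-- ===== PORT B =====
-- Source B's while-loop over index i: the remaining suffix pwd[i:] is the list argument;
-- 'i < n' is the cons case, 'pwd[i+1]' is the head of the tail, 'i += 2' drops two.
def bLoop : List Char → String → String
  | [], s => s
  | [c], s =>        -- last iteration: i + 1 < n is false
    if PySem.Chars.isdigit c then bLoop [] (String.mk [c] ++ s ++ "0")
    else if PySem.Chars.islower c then bLoop [] (s.push c)
    else if PySem.Chars.isupper c then bLoop [] (s.push c)
    else bLoop [] s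
  | c :: d :: rest, s =>
    if PySem.Chars.isdigit c then bLoop (d :: rest) (String.mk [c] ++ s ++ "0")
    else if PySem.Chars.islower c then
      if PySem.Chars.isupper d then bLoop rest (s ++ String.mk [d, c, '*'])
      else bLoop (d :: rest) (s.push c)
    else if PySem.Chars.isupper c then bLoop (d :: rest) (s.push c)
    else bLoop (d :: rest) s

def encryptPassword_alt (pwd : String) : String := bLoop pwd.toList ""

-- ===== PRECONDITION & SPEC =====
def Spec_encryptPassword (pwd : String) (out : String) : Prop := out = encryptPassword_alt pwd
instance (pwd : String) (out : String) : Decidable (Spec_encryptPassword pwd out) := by unfold Spec_encryptPassword; infer_instance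

-- ===== CLAIM (what is proved, stated in full; the proofs are below) =====
def Claim_equal_encryptPassword : Prop := ∀ (pwd : String), Dom_encryptPassword pwd → Spec_encryptPassword pwd (encryptPassword pwd)

-- ===== LEMMAS AND PROOFS =====

theorem not_islower_of_isupper (c : Char) (h : PySem.Chars.isupper c = true) :
    PySem.Chars.islower c = false := by
  have hA : 'A'.val.toNat = 65 := rfl
  have hZ : 'Z'.val.toNat = 90 := rfl
  have ha : 'a'.val.toNat = 97 := rfl
  have hz : 'z'.val.toNat = 122 := rfl
  simp only [PySem.Chars.isupper, PySem.Chars.islower, Bool.and_eq_true, decide_eq_true_eq,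
    Bool.and_eq_false_iff, decide_eq_false_iff_not, Char.le_def, UInt32.le_iff_toNat_le] at *
  omega

theorem not_isdigit_of_isupper (c : Char) (h : PySem.Chars.isupper c = true) :
    PySem.Chars.isdigit c = false := by
  have hA : 'A'.val.toNat = 65 := rfl
  have hZ : 'Z'.val.toNat = 90 := rfl
  have h0 : '0'.val.toNat = 48 := rfl
  have h9 : '9'.val.toNat = 57 := rfl
  simp only [PySem.Chars.isupper, PySem.Chars.isdigit, Bool.and_eq_true, decide_eq_true_eq,
    Bool.and_eq_false_iff, decide_eq_false_iff_not, Char.le_def, UInt32.le_iff_toNat_le] at *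
  omega

theorem bLoop_cons_digit (c : Char) (rest : List Char) (s : String)
    (h : PySem.Chars.isdigit c = true) :
    bLoop (c :: rest) s = bLoop rest (String.mk [c] ++ s ++ "0") := by
  cases rest <;> simp [bLoop, h]

theorem bLoop_cons_notlower (c : Char) (rest : List Char) (s : String)
    (h1 : PySem.Chars.isdigit c = false) (h2 : PySem.Chars.islower c = false) :
    bLoop (c :: rest) s = bLoop rest (if PySem.Chars.isupper c then s.push c else s) := by
  cases rest <;> by_cases hu : PySem.Chars.isupper c = true <;> simp [bLoop, h1, h2, hu]

-- main invariant: processing the enumerated suffix l starting at index pre.length,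
-- with every ignored index strictly below pre.length, matches B's suffix walk.
theorem aLoop_eq_bLoop (cs pre l : List Char) (s : String) (ign : List (Int × Char))
    (hcs : cs = pre ++ l) (hign : ∀ p ∈ ign, p.1 < (pre.length : Int)) :
    aLoop cs (PySem.List.enumerate l (pre.length : Int)) s ign = bLoop l s := by
  induction hn : l.length using Nat.strong_induction_on generalizing l pre s ign with
  | _ n IH =>
    match l with
    | [] => simp [PySem.List.enumerate, aLoop, bLoop]
    | c :: rest =>
      subst hn
      rw [PySem.List.enumerate_cons, aLoop]
      by_cases hd : PySem.Chars.isdigit c = true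
      · rw [if_pos hd, bLoop_cons_digit c rest s hd]
        have := IH rest.length (by simp) (pre ++ [c]) rest (String.mk [c] ++ s ++ "0") ign
          (by simp [hcs]) (by intro p hp; have := hign p hp; simp; omega) rfl
        simpa using this
      · rw [if_neg hd]
        by_cases hl : PySem.Chars.islower c = true
        · rw [if_pos hl]
          match rest with
          | [] =>
            have hlen : (pre.length : Int) = (cs.length : Int) - 1 := by
              subst hcs; simp
            rw [if_neg (by simp [hlen])]
            simp [PySem.List.enumerate, aLoop, bLoop, hd, hl]
          | d :: rest' =>
            have hne : (pre.length : Int) ≠ (cs.length : Int) - 1 := by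
              subst hcs; simp; omega
            rw [if_pos hne]
            have hget : PySem.List.pyGet? cs ((pre.length : Int) + 1) = some d := by
              subst hcs
              have := PySem.List.pyGet?_append_right pre (c :: d :: rest') 1
              simpa using this
            simp only [hget, Option.getD_some]
            by_cases hu : PySem.Chars.isupper d = true
            · rw [if_pos hu]
              -- A visits (pre.length+1, d) next and skips it via the ignored list
              rw [PySem.List.enumerate_cons, aLoop]
              have h1 : PySem.Chars.isdigit d = false := not_isdigit_of_isupper d hu
              have h2 : PySem.Chars.islower d = false := not_islower_of_isupper d hu
              rw [if_neg (by simp [h1]), if_neg (by simp [h2]), if_neg (by simp)]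
              have hB : bLoop (c :: d :: rest') s = bLoop rest' (s ++ String.mk [d, c, '*']) := by
                rw [bLoop, if_neg hd, if_pos hl, if_pos hu]
              rw [hB]
              have := IH rest'.length (by simp) (pre ++ [c, d]) rest'
                (s ++ String.mk [d, c, '*']) (ign ++ [((pre.length : Int) + 1, d)])
                (by simp [hcs])
                (by intro p hp; simp at hp
                    rcases hp with hp | hp
                    · have := hign p hp; simp; omega
                    · rw [hp]; simp) rfl
              have harith : ((pre ++ [c, d]).length : Int) = (pre.length : Int) + 1 + 1 := by
                simp; ring
              rw [harith] at this
              exact this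
            · rw [if_neg hu]
              have hB : bLoop (c :: d :: rest') s = bLoop (d :: rest') (s.push c) := by
                rw [bLoop, if_neg hd, if_pos hl, if_neg hu]
              rw [hB]
              have := IH (d :: rest').length (by simp) (pre ++ [c]) (d :: rest') (s.push c) ign
                (by simp [hcs]) (by intro p hp; have := hign p hp; simp; omega) rfl
              simpa using this
        · rw [if_neg hl,
            bLoop_cons_notlower c rest s (by simpa using hd) (by simpa using hl)]
          have hmem : ((pre.length : Int), c) ∉ ign := by
            intro h
            have := hign _ h
            simp at this
          have hrec : ∀ s', aLoop cs (PySem.List.enumerate rest ((pre.length : Int) + 1)) s' ign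
              = bLoop rest s' := by
            intro s'
            have := IH rest.length (by simp) (pre ++ [c]) rest s' ign
              (by simp [hcs]) (by intro p hp; have := hign p hp; simp; omega) rfl
            simpa using this
          by_cases hu : PySem.Chars.isupper c = true
          · rw [if_pos (by simp [hu, hmem]), if_pos hu]
            exact hrec _
          · rw [if_neg (by simp [hu]), if_neg hu]
            exact hrec _

-- ===== VERDICT (by name: the statement is the Claim_ definition above) =====
theorem encryptPassword_spec : Claim_equal_encryptPassword := by
  intro pwd _
  unfold Spec_encryptPassword encryptPassword encryptPassword_alt
  exact aLoop_eq_bLoop pwd.toList [] pwd.toList "" [] (by simp) (by simp)
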